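-- pv_equiv track=rewrite | github.com/kangsunwoo827/poker-quiz-bot | scripts/autofix_ranges.py | fix_suited_monotonicity
-- ===== SOURCE A (Python) =====
-- RANKS = "AKQJT98765432"
--
-- def fix_suited_monotonicity(action_set, mixed_set):
--     """Fix suited sequences per high card."""
--     adds = set()
--     removes = set()
--     all_action = action_set | mixed_set
--
--     for hi_idx in range(13):
--         hi = RANKS[hi_idx]
--         suited = [f"{hi}{RANKS[lo]}s" for lo in range(hi_idx + 1, 13)]
--         in_range = [h for h in suited if h in all_action]
--         if not in_range:
--             continue
--
--         for hand in in_range: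
--             idx = suited.index(hand)
--             missing_stronger = [suited[j] for j in range(idx) if suited[j] not in all_action]
--             if missing_stronger:
--                 if len(missing_stronger) >= 3:
--                     removes.add(hand)
--                 else:
--                     adds.update(missing_stronger)
--
--     return adds, removes
-- ===== SOURCE B (Python) =====
-- RANKS = "AKQJT98765432"
--
-- def fix_suited_monotonicity(action_set, mixed_set):
--     """Fix suited sequences per high card (single accumulator pass)."""
--     adds = set()
--     removes = set()
--     all_action = action_set | mixed_set
--
--     for hi_idx in range(13):
--         hi = RANKS[hi_idx]
--         missing = []
--         for lo in RANKS[hi_idx + 1:]: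
--             hand = f"{hi}{lo}s"
--             if hand in all_action:
--                 if missing:
--                     if len(missing) >= 3:
--                         removes.add(hand)
--                     else:
--                         adds.update(missing)
--             else:
--                 missing.append(hand)
--
--     return adds, removes
-- ===== Notes on version B (the rewrite author's own statement) =====
-- stated objective: simpler
-- what changed: Replaces the in_range precompute, suited.index lookup and quadratic prefix rescan per present hand with a single pass per high rank that maintains a running accumulator of missing stronger combos.
import Mathlib
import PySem

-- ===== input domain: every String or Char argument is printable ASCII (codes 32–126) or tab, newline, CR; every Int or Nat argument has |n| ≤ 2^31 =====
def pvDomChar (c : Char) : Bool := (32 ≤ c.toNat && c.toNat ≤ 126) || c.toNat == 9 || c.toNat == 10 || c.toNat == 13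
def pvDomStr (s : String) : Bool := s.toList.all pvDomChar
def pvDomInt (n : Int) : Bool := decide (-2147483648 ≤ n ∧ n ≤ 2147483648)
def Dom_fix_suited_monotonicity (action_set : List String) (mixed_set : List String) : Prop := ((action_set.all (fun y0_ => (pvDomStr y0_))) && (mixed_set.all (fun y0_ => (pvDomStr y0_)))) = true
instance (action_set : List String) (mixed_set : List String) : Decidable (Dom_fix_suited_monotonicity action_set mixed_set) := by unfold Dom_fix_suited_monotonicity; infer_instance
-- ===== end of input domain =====

-- B replaces A's per-hand suited.index lookup and prefix rescan with a single
-- accumulator pass per high rank (objective: simpler).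

-- RANKS = "AKQJT98765432" (as its character list)
def pvRanks : List Char := ['A', 'K', 'Q', 'J', 'T', '9', '8', '7', '6', '5', '4', '3', '2']

-- f"{hi}{lo}s"
def pvHand (hi lo : Char) : String := String.ofList [hi, lo, 's']

-- ===== PORT A =====
-- body of A's inner `for hand in in_range:` loop (indices from range(13)/range(idx)
-- are Nat and always in bounds, so getD-indexing is exact)
def pvAStep (mem : String → Bool) (suited : List String)
    (st : List String × List String) (hand : String) : List String × List String :=
  let idx := (PySem.List.index? suited hand).getD 0
  let missing_stronger :=
    ((List.range idx).filter (fun j => !mem (suited.getD j ""))).map (fun j => suited.getD j "")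
  if !missing_stronger.isEmpty then
    if 3 ≤ missing_stronger.length then (st.1, PySem.Set.add st.2 hand)
    else (PySem.Set.update st.1 missing_stronger, st.2)
  else st

-- body of A's outer `for hi_idx in range(13):` loop
def pvAHi (mem : String → Bool) (st : List String × List String) (hi_idx : Nat) :
    List String × List String :=
  let hi := pvRanks.getD hi_idx 'A'
  let suited := ((List.range 13).drop (hi_idx + 1)).map (fun lo => pvHand hi (pvRanks.getD lo 'A'))
  let in_range := suited.filter mem
  if in_range.isEmpty then st
  else in_range.foldl (pvAStep mem suited) st

def fix_suited_monotonicity (action_set : List String) (mixed_set : List String) :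
    List String × List String :=
  let all_action := PySem.Set.union action_set mixed_set
  (List.range 13).foldl (pvAHi (fun h => PySem.Set.contains all_action h)) ([], [])

-- ===== PORT B =====
-- body of B's inner `for lo in RANKS[hi_idx+1:]:` loop; state = (missing, (adds, removes))
def pvBStep (mem : String → Bool)
    (acc : List String × (List String × List String)) (hand : String) :
    List String × (List String × List String) :=
  if mem hand then
    if !acc.1.isEmpty then
      if 3 ≤ acc.1.length then (acc.1, (acc.2.1, PySem.Set.add acc.2.2 hand))
      else (acc.1, (PySem.Set.update acc.2.1 acc.1, acc.2.2))
    else acc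
  else (acc.1 ++ [hand], acc.2)

-- body of B's outer loop: reset missing = [], fold once over RANKS[hi_idx+1:]
def pvBHi (mem : String → Bool) (st : List String × List String) (hi_idx : Nat) :
    List String × List String :=
  let hi := pvRanks.getD hi_idx 'A'
  ((pvRanks.drop (hi_idx + 1)).foldl (fun acc lo => pvBStep mem acc (pvHand hi lo)) ([], st)).2

def fix_suited_monotonicity_alt (action_set : List String) (mixed_set : List String) :
    List String × List String :=
  let all_action := PySem.Set.union action_set mixed_set
  (List.range 13).foldl (pvBHi (fun h => PySem.Set.contains all_action h)) ([], [])

-- ===== PRECONDITION & SPEC =====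
def Spec_fix_suited_monotonicity (action_set : List String) (mixed_set : List String) (out : List String × List String) : Prop := out = fix_suited_monotonicity_alt action_set mixed_set
instance (action_set : List String) (mixed_set : List String) (out : List String × List String) : Decidable (Spec_fix_suited_monotonicity action_set mixed_set out) := by unfold Spec_fix_suited_monotonicity; infer_instance

-- ===== CLAIM (what is proved, stated in full; the proofs are below) =====
def Claim_equal_fix_suited_monotonicity : Prop := ∀ (action_set : List String) (mixed_set : List String), Dom_fix_suited_monotonicity action_set mixed_set → Spec_fix_suited_monotonicity action_set mixed_set (fix_suited_monotonicity action_set mixed_set)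

-- ===== LEMMAS AND PROOFS =====

-- mapping getD over range xs.length reproduces xs
theorem pv_range_map_getD (xs : List String) :
    (List.range xs.length).map (fun j => xs.getD j "") = xs := by
  apply List.ext_getElem
  · simp
  · intro i h1 h2
    simp [List.getD_eq_getElem?_getD, List.getElem?_eq_getElem h2]

-- A's comprehension [suited[j] for j in range(len pre) if suited[j] ∉ all_action]
-- over a prefix equals filtering the prefix
theorem pv_missing_eq (pre rest : List String) (mem : String → Bool) :
    ((List.range pre.length).filter (fun j => !mem ((pre ++ rest).getD j ""))).map
        (fun j => (pre ++ rest).getD j "")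
      = pre.filter (fun h => !mem h) := by
  have hsame : ∀ j ∈ List.range pre.length, (pre ++ rest).getD j "" = pre.getD j "" := by
    intro j hj
    rw [List.mem_range] at hj
    simp [List.getD_eq_getElem?_getD, List.getElem?_append_left hj]
  have h1 : ((List.range pre.length).filter (fun j => !mem ((pre ++ rest).getD j ""))) =
      ((List.range pre.length).filter (fun j => !mem (pre.getD j ""))) :=
    List.filter_congr (fun j hj => by rw [hsame j hj])
  rw [h1]
  have h2 : (((List.range pre.length).filter (fun j => !mem (pre.getD j ""))).map
      (fun j => (pre ++ rest).getD j ""))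
      = (((List.range pre.length).filter (fun j => !mem (pre.getD j ""))).map
      (fun j => pre.getD j "")) :=
    List.map_congr_left (fun j hj => hsame j (List.mem_of_mem_filter hj))
  rw [h2]
  have hfm := (List.filter_map (f := fun j => pre.getD j "") (p := fun h => !mem h)
    (l := List.range pre.length)).symm
  simp only [Function.comp_def] at hfm
  rw [hfm, pv_range_map_getD]

-- the core invariant: A's fold over the present hands of `rest` (with prefix `pre`
-- already scanned) equals B's single accumulator pass over `rest` started with
-- missing = the absent hands of `pre`
theorem pv_inner_core (mem : String → Bool) (rest : List String) :
    ∀ (pre : List String) (st : List String × List String),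
    (pre ++ rest).Nodup →
    (rest.filter mem).foldl (pvAStep mem (pre ++ rest)) st
      = (rest.foldl (pvBStep mem) (pre.filter (fun h => !mem h), st)).2 := by
  induction rest with
  | nil => intro pre st _; simp
  | cons c rest' ih =>
    intro pre st hnd
    have hnd' : ((pre ++ [c]) ++ rest').Nodup := by simpa using hnd
    have hdis := (List.nodup_append.mp hnd).2.2
    have hcpre : c ∉ pre := fun hc => hdis c hc c (List.mem_cons_self ..) rfl
    have happ : pre ++ c :: rest' = (pre ++ [c]) ++ rest' := by simp
    cases hm : mem c with
    | true =>
      have hidx : PySem.List.index? (pre ++ c :: rest') c = some pre.length := by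
        rw [happ, PySem.List.index?_append_of_mem rest' (by simp)]
        exact PySem.List.index?_append_singleton_self pre c hcpre
      have hA : pvAStep mem (pre ++ c :: rest') st c
          = (pvBStep mem (pre.filter (fun h => !mem h), st) c).2 := by
        unfold pvAStep pvBStep
        rw [hidx]
        simp only [Option.getD_some]
        rw [pv_missing_eq pre (c :: rest') mem]
        simp only [hm]
        split_ifs <;> rfl
      have hkeep : (pvBStep mem (pre.filter (fun h => !mem h), st) c).1
          = pre.filter (fun h => !mem h) := by
        unfold pvBStep
        simp only [hm]
        split_ifs <;> rfl
      have hBc : pvBStep mem (pre.filter (fun h => !mem h), st) c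
          = (pre.filter (fun h => !mem h), pvAStep mem (pre ++ c :: rest') st c) := by
        rw [← Prod.mk.eta (p := pvBStep mem (pre.filter (fun h => !mem h), st) c), hkeep, ← hA]
      have hmiss : (pre ++ [c]).filter (fun h => !mem h) = pre.filter (fun h => !mem h) := by
        simp [List.filter_append, hm]
      rw [List.filter_cons_of_pos (by simp [hm]), List.foldl_cons, List.foldl_cons, hBc, happ,
        ih (pre ++ [c]) _ hnd', hmiss]
    | false =>
      have hB : pvBStep mem (pre.filter (fun h => !mem h), st) c
          = (pre.filter (fun h => !mem h) ++ [c], st) := by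
        unfold pvBStep
        simp [hm]
      have hmiss : (pre ++ [c]).filter (fun h => !mem h) = pre.filter (fun h => !mem h) ++ [c] := by
        simp [List.filter_append, hm]
      rw [List.filter_cons_of_neg (by simp [hm]), List.foldl_cons, hB, happ,
        ih (pre ++ [c]) st hnd', hmiss]

-- dropping an index range then indexing maps back to dropping the char list
theorem pv_drop_range_map_char (xs : List Char) (n : Nat) :
    ((List.range xs.length).drop n).map (fun j => xs.getD j 'A') = xs.drop n := by
  apply List.ext_getElem
  · simp
  · intro i h1 h2
    have hlen : i < xs.length - n := by simpa using h2
    have hlt : n + i < xs.length := by omega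
    simp [List.getD_eq_getElem?_getD, List.getElem?_eq_getElem hlt]

-- A's suited list equals B's traversal order, as hand strings
theorem pv_suited_eq (hi : Char) (n : Nat) :
    ((List.range 13).drop n).map (fun lo => pvHand hi (pvRanks.getD lo 'A'))
      = (pvRanks.drop n).map (fun lo => pvHand hi lo) := by
  calc ((List.range 13).drop n).map (fun lo => pvHand hi (pvRanks.getD lo 'A'))
      = (((List.range pvRanks.length).drop n).map (fun j => pvRanks.getD j 'A')).map
          (fun lo => pvHand hi lo) := by rw [List.map_map]; rfl
    _ = (pvRanks.drop n).map (fun lo => pvHand hi lo) := by rw [pv_drop_range_map_char]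

theorem pv_hand_inj (hi : Char) : Function.Injective (fun lo => pvHand hi lo) := by
  intro a b h
  have := congrArg String.toList h
  simp [pvHand, String.toList_ofList] at this
  exact this

theorem pv_suited_nodup (hi : Char) (n : Nat) :
    ((pvRanks.drop n).map (fun lo => pvHand hi lo)).Nodup :=
  List.Nodup.map (pv_hand_inj hi) ((List.drop_sublist n pvRanks).nodup (by decide))

-- per-high-rank equality of A's and B's loop bodies
theorem pv_hi_eq (mem : String → Bool) (st : List String × List String) (hi_idx : Nat) :
    pvAHi mem st hi_idx = pvBHi mem st hi_idx := by
  simp only [pvAHi, pvBHi]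
  rw [pv_suited_eq]
  have hB : (pvRanks.drop (hi_idx + 1)).foldl
        (fun acc lo => pvBStep mem acc (pvHand (pvRanks.getD hi_idx 'A') lo))
        (([] : List String), st)
      = ((pvRanks.drop (hi_idx + 1)).map (fun lo => pvHand (pvRanks.getD hi_idx 'A') lo)).foldl
        (pvBStep mem) ([], st) := by
    rw [List.foldl_map]
  have hcore := pv_inner_core mem
    ((pvRanks.drop (hi_idx + 1)).map (fun lo => pvHand (pvRanks.getD hi_idx 'A') lo)) [] st
    (by simpa using pv_suited_nodup (pvRanks.getD hi_idx 'A') (hi_idx + 1))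
  simp only [List.nil_append, List.filter_nil] at hcore
  rw [hB, ← hcore]
  by_cases he : ((((pvRanks.drop (hi_idx + 1)).map
      (fun lo => pvHand (pvRanks.getD hi_idx 'A') lo)).filter mem)).isEmpty
  · rw [if_pos he, List.isEmpty_iff.mp he, List.foldl_nil]
  · rw [if_neg he]

-- ===== VERDICT (by name: the statement is the Claim_ definition above) =====
theorem fix_suited_monotonicity_spec : Claim_equal_fix_suited_monotonicity := by
  intro action_set mixed_set _
  unfold Spec_fix_suited_monotonicity
  simp only [fix_suited_monotonicity, fix_suited_monotonicity_alt]
  exact PySem.List.foldl_congr_mem (List.range 13) _ _ ([], [])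
    (fun acc x _ => pv_hi_eq _ acc x)
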